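-- pv_equiv track=rewrite | github.com/WaterlinePL/hmse_hydrological_models | processing/hydrus/file_processing/text_file_processor.py | _read_value_from_col
-- ===== SOURCE A (Python) =====
-- def _read_value_from_col(line: str, col_idx: int):
--     i = -1
--     current_value = None
--     value_start_idx = -1
--
--     parts = line.replace('\t', ' ').split(' ')
--     for p in parts:
--         value_start_idx += 1
--         if len(p) > 0:
--             i += 1
--             if i == col_idx:
--                 current_value = p
--                 break
--             else:
--                 value_start_idx += len(p)
--     return current_value, value_start_idx
-- ===== SOURCE B (Python) =====
-- def _read_value_from_col(line: str, col_idx: int):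
--     # Direct index scan over the tab-normalized string instead of split+offset bookkeeping.
--     s = line.replace('\t', ' ')
--     n = len(s)
--     i = 0
--     count = 0
--     while i < n:
--         if s[i] == ' ':
--             i += 1
--             continue
--         j = i
--         while j < n and s[j] != ' ':
--             j += 1
--         if count == col_idx:
--             return s[i:j], i
--         count += 1
--         i = j
--     return None, n
-- ===== Notes on version B (the rewrite author's own statement) =====
-- stated objective: idiomatic
-- what changed: replaces split(' ') plus per-part offset accumulation (with empty-part bookkeeping) by a single two-pointer index scan over the normalized string that finds each token run and its start offset directly
import Mathlib
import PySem

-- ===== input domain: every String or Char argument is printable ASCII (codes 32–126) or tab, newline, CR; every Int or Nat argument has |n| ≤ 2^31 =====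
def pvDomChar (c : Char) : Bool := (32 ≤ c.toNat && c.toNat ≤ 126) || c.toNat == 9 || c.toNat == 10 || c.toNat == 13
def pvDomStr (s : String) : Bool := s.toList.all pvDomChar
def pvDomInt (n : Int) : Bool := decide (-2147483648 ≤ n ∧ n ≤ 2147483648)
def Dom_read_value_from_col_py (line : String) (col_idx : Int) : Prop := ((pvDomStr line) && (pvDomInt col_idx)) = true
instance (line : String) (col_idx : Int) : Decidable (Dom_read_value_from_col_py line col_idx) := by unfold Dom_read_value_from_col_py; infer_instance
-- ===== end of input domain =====

-- B replaces A's split(' ')-plus-offset-accumulation by a single two-pointer index scan; same cost, plainer.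

-- ===== PORT A =====
-- the 'for p in parts' loop with its break, state (i, value_start_idx)
def pvLoopA (col : Int) : List (List Char) → Int → Int → Option (List Char) × Int
  | [], _, vsi => (none, vsi)
  | p :: rest, i, vsi =>
    let vsi' := vsi + 1
    if 0 < p.length then
      let i' := i + 1
      if i' = col then (some p, vsi')
      else pvLoopA col rest i' (vsi' + (p.length : Int))
    else pvLoopA col rest i vsi'

def read_value_from_col_py (line : String) (col_idx : Int) : Option String × Int :=
  let s := PySem.Chars.replace line.toList ['\t'] [' ']
  let parts := PySem.Chars.splitOn s [' ']
  let r := pvLoopA col_idx parts (-1) (-1)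
  (r.1.map String.mk, r.2)

-- ===== PORT B =====
-- Source B's outer while loop; the inner 'while j < n and s[j] != " "' + slice s[i:j] is takeWhile,
-- advancing i to j is dropWhile (exact: same characters scanned, same token and offsets)
def pvScanB (col : Int) : List Char → Int → Int → Option (List Char) × Int
  | [], pos, _ => (none, pos)
  | c :: cs, pos, count =>
    if c = ' ' then pvScanB col cs (pos + 1) count
    else
      let tok := (c :: cs).takeWhile (· ≠ ' ')
      if count = col then (some tok, pos)
      else pvScanB col ((c :: cs).dropWhile (· ≠ ' ')) (pos + (tok.length : Int)) (count + 1)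
termination_by s => s.length
decreasing_by
  · simp
  · simp only [List.dropWhile]
    simp [*]
    exact List.length_dropWhile_le _ _

def read_value_from_col_py_alt (line : String) (col_idx : Int) : Option String × Int :=
  let s := PySem.Chars.replace line.toList ['\t'] [' ']
  let r := pvScanB col_idx s 0 0
  (r.1.map String.mk, r.2)

-- ===== PRECONDITION & SPEC =====
def Spec_read_value_from_col_py (line : String) (col_idx : Int) (out : Option String × Int) : Prop := out = read_value_from_col_py_alt line col_idx
instance (line : String) (col_idx : Int) (out : Option String × Int) : Decidable (Spec_read_value_from_col_py line col_idx out) := by unfold Spec_read_value_from_col_py; infer_instance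

-- ===== CLAIM (what is proved, stated in full; the proofs are below) =====
def Claim_equal_read_value_from_col_py : Prop := ∀ (line : String) (col_idx : Int), Dom_read_value_from_col_py line col_idx → Spec_read_value_from_col_py line col_idx (read_value_from_col_py line col_idx)

-- ===== LEMMAS AND PROOFS =====

-- split on a single space, as (first part, remaining parts)
def pvSplit : List Char → List Char × List (List Char)
  | [] => ([], [])
  | c :: cs =>
    if c = ' ' then ([], (pvSplit cs).1 :: (pvSplit cs).2)
    else (c :: (pvSplit cs).1, (pvSplit cs).2)

theorem pvSplit_fst (s : List Char) : (pvSplit s).1 = s.takeWhile (· ≠ ' ') := by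
  induction s with
  | nil => simp [pvSplit]
  | cons c cs ih =>
    by_cases h : c = ' ' <;> simp [pvSplit, List.takeWhile, h, ih]

theorem pvSplit_snd (s : List Char) :
    (pvSplit s).2 = (match s.dropWhile (· ≠ ' ') with
      | [] => []
      | _ :: r => (pvSplit r).1 :: (pvSplit r).2) := by
  induction s with
  | nil => simp [pvSplit, List.dropWhile]
  | cons c cs ih =>
    by_cases h : c = ' ' <;> simp [pvSplit, List.dropWhile, h, ih]

theorem pvDropWhile_head (s : List Char) (d : Char) (r : List Char)
    (h : s.dropWhile (· ≠ ' ') = d :: r) : d = ' ' := by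
  induction s with
  | nil => simp [List.dropWhile] at h
  | cons c cs ih =>
    by_cases hc : c = ' '
    · have he : (c :: cs).dropWhile (· ≠ ' ') = c :: cs := by simp [List.dropWhile, hc]
      rw [he] at h
      injection h with h1 _
      rw [← h1, hc]
    · have he : (c :: cs).dropWhile (· ≠ ' ') = cs.dropWhile (· ≠ ' ') := by
        simp [List.dropWhile, hc]
      rw [he] at h
      exact ih h

theorem pvGo_eq (fuel : Nat) (l cur : List Char) (acc : List (List Char))
    (h : l.length < fuel) :
    PySem.Chars.splitOn.go [' '] fuel l cur acc =
      acc.reverse ++ (cur.reverse ++ (pvSplit l).1) :: (pvSplit l).2 := by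
  induction fuel generalizing l cur acc with
  | zero => omega
  | succ n ih =>
    cases l with
    | nil => simp [PySem.Chars.splitOn.go, pvSplit]
    | cons c rest =>
      by_cases hc : c = ' '
      · subst hc
        rw [PySem.Chars.splitOn.go]
        simp only [List.isPrefixOf, BEq.rfl, Bool.true_and, if_pos, List.length_cons,
          List.length_nil, List.drop_succ_cons, List.drop_zero]
        rw [ih rest [] ((cur.reverse) :: acc) (by simp at h; omega)]
        simp [pvSplit]
      · rw [PySem.Chars.splitOn.go]
        have hp : ([' '] : List Char).isPrefixOf (c :: rest) = false := by
          simp [List.isPrefixOf]; exact fun hh => hc hh.symm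
        simp only [hp, Bool.false_eq_true, if_false]
        rw [ih rest (c :: cur) acc (by simp at h; omega)]
        simp [pvSplit, hc]

theorem pvSplitOn_space (s : List Char) :
    PySem.Chars.splitOn s [' '] = (pvSplit s).1 :: (pvSplit s).2 := by
  show PySem.Chars.splitOn.go [' '] (s.length + 1) s [] [] = _
  rw [pvGo_eq s.length.succ s [] [] (Nat.lt_succ_self _)]
  simp

theorem pvMain (col : Int) (n : Nat) (s : List Char) (hn : s.length = n) (i pos : Int) :
    pvLoopA col ((pvSplit s).1 :: (pvSplit s).2) i (pos - 1) = pvScanB col s pos (i + 1) := by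
  induction n using Nat.strong_induction_on generalizing s i pos with
  | _ n IH =>
  cases s with
  | nil => simp [pvSplit, pvLoopA, pvScanB]
  | cons c cs =>
    by_cases hc : c = ' '
    · subst hc
      have h1 : pvSplit (' ' :: cs) = ([], (pvSplit cs).1 :: (pvSplit cs).2) := by
        simp [pvSplit]
      rw [h1]
      show pvLoopA col ([] :: (pvSplit cs).1 :: (pvSplit cs).2) i (pos - 1) = _
      rw [pvScanB]
      simp only [if_true]
      simp only [pvLoopA, List.length_nil, Nat.lt_irrefl, if_false]
      have : (pos - 1) + 1 = (pos + 1) - 1 := by omega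
      rw [this]
      exact IH cs.length (by simp at hn; omega) cs rfl i (pos + 1)
    · have h1 : pvSplit (c :: cs) = (c :: (pvSplit cs).1, (pvSplit cs).2) := by
        simp [pvSplit, hc]
      rw [h1]
      rw [pvScanB]
      simp only [if_neg hc]
      have htw : (c :: cs).takeWhile (· ≠ ' ') = c :: (pvSplit cs).1 := by
        simp [List.takeWhile, hc, pvSplit_fst]
      have hdwc : (c :: cs).dropWhile (· ≠ ' ') = cs.dropWhile (· ≠ ' ') := by
        simp [List.dropWhile, hc]
      rw [pvLoopA]
      simp only [List.length_cons, Nat.zero_lt_succ, if_pos, htw, hdwc]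
      have hsub : pos - 1 + 1 = pos := by omega
      rw [hsub]
      by_cases hcol : i + 1 = col
      · simp [hcol]
      · simp only [if_neg hcol]
        rw [pvSplit_snd cs]
        have hlen : ((c :: (pvSplit cs).1).length : Int) = ((pvSplit cs).1.length : Int) + 1 := by
          simp
        cases hdw : cs.dropWhile (· ≠ ' ') with
        | nil =>
          simp only [pvLoopA, pvScanB]
        | cons d r =>
          have hd : d = ' ' := pvDropWhile_head cs d r hdw
          subst hd
          rw [pvScanB]
          simp only [if_true]
          have hr : r.length < n := by
            have h2 := List.length_dropWhile_le (p := fun x => decide (x ≠ ' ')) cs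
            rw [hdw] at h2
            simp at h2 hn
            omega
          have hkey := IH r.length hr r rfl (i + 1)
            (pos + (((pvSplit cs).1.length + 1 : Nat) : Int) + 1)
          have harg : pos + (((pvSplit cs).1.length + 1 : Nat) : Int) + 1 - 1
              = pos + (((pvSplit cs).1.length + 1 : Nat) : Int) := by omega
          rw [harg] at hkey
          exact hkey

-- ===== VERDICT (by name: the statement is the Claim_ definition above) =====
theorem read_value_from_col_py_spec : Claim_equal_read_value_from_col_py := by
  intro line col_idx _
  unfold Spec_read_value_from_col_py read_value_from_col_py read_value_from_col_py_alt
  simp only []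
  rw [pvSplitOn_space]
  have := pvMain col_idx (PySem.Chars.replace line.toList ['\t'] [' ']).length
    (PySem.Chars.replace line.toList ['\t'] [' ']) rfl (-1) 0
  norm_num at this
  rw [this]
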